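-- pv_equiv track=rewrite | github.com/axellbrendow/leetcode | python/lonely-pixel-ii.py | sum_black_pixels_in_columns_where_all_black_pixels_in_the_column_are_in_lines_that_are_equal
-- ===== SOURCE A (Python) =====
-- from collections import defaultdict
--
-- def create_hashmaps(picture):
-- 	nlines = len(picture)
-- 	ncolumns = len(picture[0])
--
-- 	cols_and_rows_with_b = defaultdict(list)
-- 	rows_str = {}
-- 	col_and_black_pixels = defaultdict(int)
-- 	row_and_black_pixels = defaultdict(int)
--
-- 	for i in range(nlines):
-- 		rows_str[i] = ''.join(picture[i])
-- 		for j in range(ncolumns):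
-- 			if picture[i][j] == 'B':
-- 				row_and_black_pixels[i] += 1
-- 				col_and_black_pixels[j] += 1
-- 				cols_and_rows_with_b[j].append(i)
--
-- 	return cols_and_rows_with_b, rows_str, col_and_black_pixels, row_and_black_pixels
--
-- def sum_black_pixels_in_columns_where_all_black_pixels_in_the_column_are_in_lines_that_are_equal(picture, N):
-- 	cols_and_rows_with_b,\
-- 	rows_str,\
-- 	col_and_black_pixels,\
-- 	row_and_black_pixels = create_hashmaps(picture)
--
-- 	count = 0
-- 	for col in cols_and_rows_with_b:
-- 		rows = cols_and_rows_with_b[col]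
-- 		if not all(rows_str[row] == rows_str[rows[0]] for row in rows):
-- 			continue
-- 		if not col_and_black_pixels[col] == row_and_black_pixels[rows[0]] == N:
-- 			continue
-- 		count += N
-- 	return count
-- ===== SOURCE B (Python) =====
-- def sum_black_pixels_in_columns_where_all_black_pixels_in_the_column_are_in_lines_that_are_equal(picture, N):
--     ncolumns = len(picture[0])
--     # agg: column j -> (count of B's seen, join of first B-row, B-count of first B-row,
--     #                   whether every B-row so far joins equal to the first)
--     agg = {}
--     for row in picture:
--         s = ''.join(row)
--         bcols = [j for j in range(ncolumns) if row[j] == 'B']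
--         b = len(bcols)
--         for j in bcols:
--             if j in agg:
--                 cnt, fs, fb, ok = agg[j]
--                 agg[j] = (cnt + 1, fs, fb, ok and s == fs)
--             else:
--                 agg[j] = (1, s, b, True)
--     total = 0
--     for cnt, fs, fb, ok in agg.values():
--         if ok and cnt == N and fb == N:
--             total += N
--     return total
-- ===== Notes on version B (the rewrite author's own statement) =====
-- stated objective: alternative
-- what changed: Replaces A's two-phase build of four dicts (column->row-list, row->string, two counters) plus a second loop that re-scans every column's row list with all() by a single fused pass maintaining one per-column aggregate (count, first row's join, first row's B-count, all-equal flag updated incrementally), finishing with a flat scan over the aggregate values.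
import Mathlib
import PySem

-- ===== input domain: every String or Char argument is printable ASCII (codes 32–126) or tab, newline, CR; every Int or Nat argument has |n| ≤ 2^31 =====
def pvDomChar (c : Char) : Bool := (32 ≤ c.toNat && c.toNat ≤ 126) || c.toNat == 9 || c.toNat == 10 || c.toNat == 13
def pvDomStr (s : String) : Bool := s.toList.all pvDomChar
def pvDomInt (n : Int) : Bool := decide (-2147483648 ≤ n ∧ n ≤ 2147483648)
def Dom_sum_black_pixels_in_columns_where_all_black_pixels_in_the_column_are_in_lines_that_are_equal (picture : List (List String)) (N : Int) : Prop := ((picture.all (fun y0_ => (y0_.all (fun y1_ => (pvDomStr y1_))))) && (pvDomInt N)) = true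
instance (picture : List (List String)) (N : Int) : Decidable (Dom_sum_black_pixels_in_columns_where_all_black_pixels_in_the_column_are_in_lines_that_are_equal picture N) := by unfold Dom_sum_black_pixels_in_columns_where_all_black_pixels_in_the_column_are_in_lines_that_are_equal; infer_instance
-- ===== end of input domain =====

-- B replaces A's four dicts + per-column all() re-scan by one fused pass keeping a per-column
-- aggregate (count, first row's join, its B-count, incremental all-equal flag); same O(rows*cols) cost.

-- ===== PORT A =====
-- create_hashmaps: nested loops over range(nlines) x range(ncolumns) building the four dicts
def pvCreateHashmaps (picture : List (List String)) :
    PySem.Dict Int (List Int) × PySem.Dict Int String × PySem.Dict Int Int × PySem.Dict Int Int :=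
  let nlines : Int := PySem.List.len picture
  let ncolumns : Int := PySem.List.len (PySem.List.pyGetD picture 0 [])
  (PySem.List.pyRange 0 nlines 1).foldl
    (fun st i =>
      let st' : PySem.Dict Int (List Int) × PySem.Dict Int String × PySem.Dict Int Int × PySem.Dict Int Int :=
        (st.1, st.2.1.insert i (PySem.Str.join "" (PySem.List.pyGetD picture i [])), st.2.2.1, st.2.2.2)
      (PySem.List.pyRange 0 ncolumns 1).foldl
        (fun st2 j =>
          if PySem.List.pyGetD (PySem.List.pyGetD picture i []) j "" == "B" then
            (st2.1.modify j [] (· ++ [i]),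
             st2.2.1,
             st2.2.2.1.modify j 0 (· + 1),
             st2.2.2.2.modify i 0 (· + 1))
          else st2)
        st')
    (PySem.Dict.empty, PySem.Dict.empty, PySem.Dict.empty, PySem.Dict.empty)

def sum_black_pixels_in_columns_where_all_black_pixels_in_the_column_are_in_lines_that_are_equal (picture : List (List String)) (N : Int) : Int :=
  let h := pvCreateHashmaps picture
  let crb := h.1
  let rs := h.2.1
  let cb := h.2.2.1
  let rb := h.2.2.2
  crb.keys.foldl
    (fun count col =>
      let rows := crb.getD col []
      if !(rows.all (fun row => rs.getD row "" == rs.getD (PySem.List.pyGetD rows 0 0) "")) then count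
      else if !((cb.getD col 0 == rb.getD (PySem.List.pyGetD rows 0 0) 0) &&
                (rb.getD (PySem.List.pyGetD rows 0 0) 0 == N)) then count
      else count + N)
    0

-- ===== PORT B =====
def sum_black_pixels_in_columns_where_all_black_pixels_in_the_column_are_in_lines_that_are_equal_alt (picture : List (List String)) (N : Int) : Int :=
  let ncolumns : Int := PySem.List.len (PySem.List.pyGetD picture 0 [])
  let agg : PySem.Dict Int (Int × String × Int × Bool) :=
    picture.foldl
      (fun agg row =>
        let s := PySem.Str.join "" row
        let bcols := (PySem.List.pyRange 0 ncolumns 1).filter (fun j => PySem.List.pyGetD row j "" == "B")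
        let b : Int := PySem.List.len bcols
        bcols.foldl
          (fun agg j =>
            match agg.get? j with
            | some v => agg.insert j (v.1 + 1, v.2.1, v.2.2.1, v.2.2.2 && (s == v.2.1))
            | none => agg.insert j (1, s, b, true))
          agg)
      PySem.Dict.empty
  agg.values.foldl
    (fun total v => if v.2.2.2 && (v.1 == N) && (v.2.2.1 == N) then total + N else total)
    0

-- ===== PRECONDITION & SPEC =====
-- Pre_ excludes exactly the inputs where Python A raises IndexError: the empty picture
-- (picture[0]) and pictures where some row is shorter than row 0 (picture[i][j]); B raises there too.
def Pre_sum_black_pixels_in_columns_where_all_black_pixels_in_the_column_are_in_lines_that_are_equal (picture : List (List String)) (N : Int) : Prop :=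
  picture ≠ [] ∧ ∀ row ∈ picture, (picture.headD []).length ≤ row.length

instance (picture : List (List String)) (N : Int) : Decidable (Pre_sum_black_pixels_in_columns_where_all_black_pixels_in_the_column_are_in_lines_that_are_equal picture N) := by unfold Pre_sum_black_pixels_in_columns_where_all_black_pixels_in_the_column_are_in_lines_that_are_equal; infer_instance

def pvWitness_sum_black_pixels_in_columns_where_all_black_pixels_in_the_column_are_in_lines_that_are_equal : List (List String) × Int :=
  ([["B", "W"], ["W", "B"]], 1)

def Spec_sum_black_pixels_in_columns_where_all_black_pixels_in_the_column_are_in_lines_that_are_equal (picture : List (List String)) (N : Int) (out : Int) : Prop := out = sum_black_pixels_in_columns_where_all_black_pixels_in_the_column_are_in_lines_that_are_equal_alt picture N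
instance (picture : List (List String)) (N : Int) (out : Int) : Decidable (Spec_sum_black_pixels_in_columns_where_all_black_pixels_in_the_column_are_in_lines_that_are_equal picture N out) := by unfold Spec_sum_black_pixels_in_columns_where_all_black_pixels_in_the_column_are_in_lines_that_are_equal; infer_instance

-- ===== CLAIM (what is proved, stated in full; the proofs are below) =====
def Claim_equal_sum_black_pixels_in_columns_where_all_black_pixels_in_the_column_are_in_lines_that_are_equal : Prop := ∀ (picture : List (List String)) (N : Int), Dom_sum_black_pixels_in_columns_where_all_black_pixels_in_the_column_are_in_lines_that_are_equal picture N → Pre_sum_black_pixels_in_columns_where_all_black_pixels_in_the_column_are_in_lines_that_are_equal picture N → Spec_sum_black_pixels_in_columns_where_all_black_pixels_in_the_column_are_in_lines_that_are_equal picture N (sum_black_pixels_in_columns_where_all_black_pixels_in_the_column_are_in_lines_that_are_equal picture N)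

-- ===== LEMMAS AND PROOFS =====

-- Pure model of both computations: per-column row lists, joins, B-counts

def pvRowAt (picture : List (List String)) (i : Int) : List String := PySem.List.pyGetD picture i []
def pvIsB (r : List String) (j : Int) : Bool := PySem.List.pyGetD r j "" == "B"
def pvBC (n : Int) (r : List String) : List Int := (PySem.List.pyRange 0 n 1).filter (fun j => pvIsB r j)
def pvCR (picture : List (List String)) (n : Int) (m : Nat) (j : Int) : List Int :=
  (PySem.List.pyRange 0 (m:Int) 1).filter (fun i => decide (j ∈ pvBC n (pvRowAt picture i)))
def pvJn (r : List String) : String := PySem.Str.join "" r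
def pvHd (l : List Int) : Int := l.getD 0 0


-- splitting A's 4-component inner fold (the three non-rs components are independent)
theorem pv_foldl_split {α β γ δ ε : Type} (l : List ε) (f1 : α → ε → α) (f3 : γ → ε → γ) (f4 : δ → ε → δ)
    (a : α) (b : β) (c : γ) (d : δ) :
    l.foldl (fun st e => (f1 st.1 e, st.2.1, f3 st.2.2.1 e, f4 st.2.2.2 e)) (a, b, c, d)
      = (l.foldl f1 a, b, l.foldl f3 c, l.foldl f4 d) := by
  induction l generalizing a c d with
  | nil => rfl
  | cons x xs ih => simpa using ih (f1 a x) (f3 c x) (f4 d x)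

-- one outer-loop step of A's create_hashmaps
theorem pvA_step (picture : List (List String)) (n : Int) (i : Int)
    (st : PySem.Dict Int (List Int) × PySem.Dict Int String × PySem.Dict Int Int × PySem.Dict Int Int) :
    (let st' : PySem.Dict Int (List Int) × PySem.Dict Int String × PySem.Dict Int Int × PySem.Dict Int Int :=
        (st.1, st.2.1.insert i (PySem.Str.join "" (PySem.List.pyGetD picture i [])), st.2.2.1, st.2.2.2)
     (PySem.List.pyRange 0 n 1).foldl
        (fun st2 j =>
          if PySem.List.pyGetD (PySem.List.pyGetD picture i []) j "" == "B" then
            (st2.1.modify j [] (· ++ [i]), st2.2.1, st2.2.2.1.modify j 0 (· + 1), st2.2.2.2.modify i 0 (· + 1))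
          else st2)
        st')
      = (pvBC n (pvRowAt picture i) |>.foldl (fun d j => d.modify j [] (· ++ [i])) st.1,
         st.2.1.insert i (pvJn (pvRowAt picture i)),
         pvBC n (pvRowAt picture i) |>.foldl (fun d j => d.modify j 0 (· + 1)) st.2.2.1,
         pvBC n (pvRowAt picture i) |>.foldl (fun d _ => d.modify i 0 (· + 1)) st.2.2.2) := by
  show (PySem.List.pyRange 0 n 1).foldl
        (fun st2 j =>
          if pvIsB (pvRowAt picture i) j then
            (st2.1.modify j [] (· ++ [i]), st2.2.1, st2.2.2.1.modify j 0 (· + 1), st2.2.2.2.modify i 0 (· + 1))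
          else st2)
        (st.1, st.2.1.insert i (pvJn (pvRowAt picture i)), st.2.2.1, st.2.2.2) = _
  rw [PySem.List.foldl_if_eq_foldl_filter]
  show (pvBC n (pvRowAt picture i)).foldl
        (fun st2 j => (st2.1.modify j [] (· ++ [i]), st2.2.1, st2.2.2.1.modify j 0 (· + 1), st2.2.2.2.modify i 0 (· + 1)))
        (st.1, st.2.1.insert i (pvJn (pvRowAt picture i)), st.2.2.1, st.2.2.2) = _
  exact pv_foldl_split (pvBC n (pvRowAt picture i))
    (fun d j => d.modify j [] (· ++ [i]))
    (fun d j => d.modify j 0 (· + 1))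
    (fun d _ => d.modify i 0 (· + 1))
    st.1 (st.2.1.insert i (pvJn (pvRowAt picture i))) st.2.2.1 st.2.2.2

theorem pv_crb_getD (bc : List Int) (hnd : bc.Nodup) (i c : Int) (d : PySem.Dict Int (List Int)) :
    (bc.foldl (fun d j => d.modify j [] (· ++ [i])) d).getD c []
      = d.getD c [] ++ (if c ∈ bc then [i] else []) := by
  rw [show (bc.foldl (fun d j => d.modify j [] (· ++ [i])) d)
        = ((bc.map (fun j => (j, i))).foldl (fun d p => d.modify p.1 [] (· ++ [p.2])) d) from
      (List.foldl_map (f := fun j => ((j : Int), i)) (g := fun (d : PySem.Dict Int (List Int)) p => d.modify p.1 [] (· ++ [p.2]))).symm]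
  rw [PySem.Dict.getD_foldl_modify_append]
  congr 1
  rw [List.filter_map]
  rw [show ((fun p => p.1 == c) ∘ (fun j => ((j : Int), i))) = (fun j => j == c) from rfl, List.filter_beq]
  by_cases h : c ∈ bc
  · simp [List.count_eq_one_of_mem hnd h, h]
  · simp [List.count_eq_zero.mpr h, h]

theorem pv_cb_getD (bc : List Int) (hnd : bc.Nodup) (c : Int) (d : PySem.Dict Int Int) :
    (bc.foldl (fun d j => d.modify j 0 (· + 1)) d).getD c 0
      = d.getD c 0 + (if c ∈ bc then 1 else 0) := by
  rw [PySem.Dict.getD_foldl_modify_add_one]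
  by_cases h : c ∈ bc
  · simp [List.count_eq_one_of_mem hnd h, h]
  · simp [List.count_eq_zero.mpr h, h]

theorem pv_rb_getD (bc : List Int) (i c : Int) (d : PySem.Dict Int Int) :
    (bc.foldl (fun d _ => d.modify i 0 (· + 1)) d).getD c 0
      = d.getD c 0 + (if c = i then (bc.length : Int) else 0) := by
  rw [show (bc.foldl (fun d _ => d.modify i 0 (· + 1)) d)
        = ((bc.map (fun _ => i)).foldl (fun d x => d.modify x 0 (· + 1)) d) from
      (List.foldl_map (f := fun (_ : Int) => i) (g := fun (d : PySem.Dict Int Int) x => d.modify x 0 (· + 1))).symm]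
  rw [PySem.Dict.getD_foldl_modify_add_one]
  rw [List.map_const']
  by_cases h : c = i
  · simp [h]
  · simp [h, List.count_replicate, Ne.symm h]

theorem pv_crb_keys (bc : List Int) (i : Int) (d : PySem.Dict Int (List Int)) :
    (bc.foldl (fun d j => d.modify j [] (· ++ [i])) d).keys = PySem.Set.update d.keys bc := by
  exact PySem.Dict.keys_foldl_modify bc [] (fun _ _ v => v ++ [i]) d

theorem pvBC_nodup (n : Int) (r : List String) : (pvBC n r).Nodup :=
  (PySem.List.nodup_pyRange_one 0 n).filter _

theorem pvCR_succ (picture : List (List String)) (n : Int) (m : Nat) (j : Int) :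
    pvCR picture n (m + 1) j
      = pvCR picture n m j ++ (if j ∈ pvBC n (pvRowAt picture (m : Int)) then [(m : Int)] else []) := by
  unfold pvCR
  rw [show ((m + 1 : Nat) : Int) = (m : Int) + 1 by push_cast; ring]
  rw [PySem.List.pyRange_one_succ_right (by positivity)]
  rw [List.filter_append]
  by_cases h : j ∈ pvBC n (pvRowAt picture (m : Int)) <;> simp [h]

def pvFoldA (picture : List (List String)) (n : Int) (m : Nat) :
    PySem.Dict Int (List Int) × PySem.Dict Int String × PySem.Dict Int Int × PySem.Dict Int Int :=
  (PySem.List.pyRange 0 (m : Int) 1).foldl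
    (fun st i =>
      let st' : PySem.Dict Int (List Int) × PySem.Dict Int String × PySem.Dict Int Int × PySem.Dict Int Int :=
        (st.1, st.2.1.insert i (PySem.Str.join "" (PySem.List.pyGetD picture i [])), st.2.2.1, st.2.2.2)
      (PySem.List.pyRange 0 n 1).foldl
        (fun st2 j =>
          if PySem.List.pyGetD (PySem.List.pyGetD picture i []) j "" == "B" then
            (st2.1.modify j [] (· ++ [i]), st2.2.1, st2.2.2.1.modify j 0 (· + 1), st2.2.2.2.modify i 0 (· + 1))
          else st2)
        st')
    (PySem.Dict.empty, PySem.Dict.empty, PySem.Dict.empty, PySem.Dict.empty)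

theorem pvFoldA_succ (picture : List (List String)) (n : Int) (m : Nat) :
    pvFoldA picture n (m + 1)
      = ((pvBC n (pvRowAt picture (m : Int))).foldl (fun d j => d.modify j [] (· ++ [(m : Int)])) (pvFoldA picture n m).1,
         (pvFoldA picture n m).2.1.insert (m : Int) (pvJn (pvRowAt picture (m : Int))),
         (pvBC n (pvRowAt picture (m : Int))).foldl (fun d j => d.modify j 0 (· + 1)) (pvFoldA picture n m).2.2.1,
         (pvBC n (pvRowAt picture (m : Int))).foldl (fun d _ => d.modify (m : Int) 0 (· + 1)) (pvFoldA picture n m).2.2.2) := by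
  rw [show pvFoldA picture n (m + 1)
        = (PySem.List.pyRange 0 ((m : Int) + 1) 1).foldl _ (PySem.Dict.empty, PySem.Dict.empty, PySem.Dict.empty, PySem.Dict.empty) by
      unfold pvFoldA; rw [show ((m + 1 : Nat) : Int) = (m : Int) + 1 by push_cast; ring]]
  rw [PySem.List.pyRange_one_succ_right (by positivity), List.foldl_append]
  exact pvA_step picture n (m : Int) (pvFoldA picture n m)

theorem pvA_inv (picture : List (List String)) (n : Int) (m : Nat) :
    (∀ v : Int, (pvFoldA picture n m).2.1.getD v ""
        = if 0 ≤ v ∧ v < (m : Int) then pvJn (pvRowAt picture v) else "")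
    ∧ (∀ v : Int, (pvFoldA picture n m).2.2.2.getD v 0
        = if 0 ≤ v ∧ v < (m : Int) then ((pvBC n (pvRowAt picture v)).length : Int) else 0)
    ∧ (∀ j : Int, (pvFoldA picture n m).2.2.1.getD j 0 = ((pvCR picture n m j).length : Int))
    ∧ (∀ j : Int, (pvFoldA picture n m).1.getD j [] = pvCR picture n m j)
    ∧ (∀ j : Int, j ∈ (pvFoldA picture n m).1.keys ↔ pvCR picture n m j ≠ [])
    ∧ (pvFoldA picture n m).1.keys.Nodup := by
  induction m with
  | zero =>
    refine ⟨?_, ?_, ?_, ?_, ?_, ?_⟩ <;>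
      simp [pvFoldA, PySem.List.pyRange_zero, pvCR, PySem.Dict.getD_empty, PySem.Dict.keys_empty]
  | succ m ih =>
    obtain ⟨ha, hb, hc, hd, he, hf⟩ := ih
    rw [pvFoldA_succ]
    refine ⟨?_, ?_, ?_, ?_, ?_, ?_⟩
    · intro v
      rw [PySem.Dict.getD_insert, ha v]
      by_cases hv : v = (m : Int)
      · simp only [hv]
        have h1 : 0 ≤ (m : Int) ∧ (m : Int) < (m : Int) + 1 := by omega
        simp [h1]
      · simp only [hv, if_false]
        by_cases h0 : 0 ≤ v ∧ v < (m : Int)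
        · have h1 : 0 ≤ v ∧ v < (m : Int) + 1 := by omega
          simp [h0, h1]
        · have h1 : ¬ (0 ≤ v ∧ v < ((m + 1 : Nat) : Int)) := by push_cast; omega
          rw [if_neg h0, if_neg h1]
    · intro v
      rw [pv_rb_getD, hb v]
      by_cases hv : v = (m : Int)
      · have h1 : 0 ≤ v ∧ v < (m : Int) + 1 := by omega
        have h0 : ¬ (0 ≤ v ∧ v < (m : Int)) := by omega
        rw [if_neg h0, if_pos (by push_cast; omega : (0:Int) ≤ v ∧ v < ((m + 1 : Nat) : Int))]
        simp [hv]
      · by_cases h0 : 0 ≤ v ∧ v < (m : Int)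
        · have h1 : 0 ≤ v ∧ v < (m : Int) + 1 := by omega
          simp [hv, h0, h1]
        · have h1 : ¬ (0 ≤ v ∧ v < ((m + 1 : Nat) : Int)) := by push_cast; omega
          rw [if_neg h0, if_neg h1, if_neg hv]; ring
    · intro j
      rw [pv_cb_getD _ (pvBC_nodup n _), hc j, pvCR_succ]
      by_cases h : j ∈ pvBC n (pvRowAt picture (m : Int)) <;> simp [h]
    · intro j
      rw [pv_crb_getD _ (pvBC_nodup n _), hd j, pvCR_succ]
    · intro j
      rw [pv_crb_keys, pvCR_succ]
      rw [PySem.Set.mem_update]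
      by_cases h : j ∈ pvBC n (pvRowAt picture (m : Int)) <;> simp [h, he j]
    · rw [pv_crb_keys]
      exact PySem.Set.nodup_update _ _ hf

def pvUpd (s : String) (b : Int) (v? : Option (Int × String × Int × Bool)) : Int × String × Int × Bool :=
  match v? with
  | some v => (v.1 + 1, v.2.1, v.2.2.1, v.2.2.2 && (s == v.2.1))
  | none => (1, s, b, true)

theorem pv_get?_foldl_insert_of_not_mem {ν : Type} (f : PySem.Dict Int ν → Int → ν) (l : List Int) (c : Int)
    (h : c ∉ l) (d : PySem.Dict Int ν) :
    (l.foldl (fun d x => d.insert x (f d x)) d).get? c = d.get? c := by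
  induction l generalizing d with
  | nil => rfl
  | cons x xs ih =>
    have hx : c ≠ x := fun he => h (he ▸ List.mem_cons_self)
    rw [List.foldl_cons, ih (fun hm => h (List.mem_cons_of_mem _ hm)),
        PySem.Dict.get?_insert_of_ne _ _ hx]

theorem pv_get?_inner (s : String) (b : Int) (l : List Int) (hnd : l.Nodup) (c : Int) (hc : c ∈ l)
    (d : PySem.Dict Int (Int × String × Int × Bool)) :
    (l.foldl (fun d x => d.insert x (pvUpd s b (d.get? x))) d).get? c = some (pvUpd s b (d.get? c)) := by
  obtain ⟨l1, l2, rfl⟩ := List.append_of_mem hc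
  obtain ⟨hn1, hn2, hdisj⟩ := List.nodup_append.mp hnd
  have h1 : c ∉ l1 := fun hm => hdisj c hm c List.mem_cons_self rfl
  have h2 : c ∉ l2 := fun hm => (List.nodup_cons.mp hn2).1 hm
  rw [List.foldl_append, List.foldl_cons]
  rw [pv_get?_foldl_insert_of_not_mem _ l2 c h2]
  rw [PySem.Dict.get?_insert_self]
  rw [pv_get?_foldl_insert_of_not_mem _ l1 c h1]

def pvAE (picture : List (List String)) (n : Int) (m : Nat) (j : Int) : Bool :=
  (pvCR picture n m j).all
    (fun i => pvJn (pvRowAt picture i) == pvJn (pvRowAt picture (pvHd (pvCR picture n m j))))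

def pvFoldB (picture : List (List String)) (n : Int) (m : Nat) :
    PySem.Dict Int (Int × String × Int × Bool) :=
  (picture.take m).foldl
    (fun agg row =>
      let s := PySem.Str.join "" row
      let bcols := (PySem.List.pyRange 0 n 1).filter (fun j => PySem.List.pyGetD row j "" == "B")
      let b : Int := PySem.List.len bcols
      bcols.foldl
        (fun agg j =>
          match agg.get? j with
          | some v => agg.insert j (v.1 + 1, v.2.1, v.2.2.1, v.2.2.2 && (s == v.2.1))
          | none => agg.insert j (1, s, b, true))
        agg)
    PySem.Dict.empty

-- B's inner body is an insert of pvUpd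
theorem pvB_body_eq (s : String) (b : Int) :
    (fun (agg : PySem.Dict Int (Int × String × Int × Bool)) (j : Int) =>
        match agg.get? j with
        | some v => agg.insert j (v.1 + 1, v.2.1, v.2.2.1, v.2.2.2 && (s == v.2.1))
        | none => agg.insert j (1, s, b, true))
      = (fun agg j => agg.insert j (pvUpd s b (agg.get? j))) := by
  funext agg j
  cases h : agg.get? j <;> simp [pvUpd]

theorem pvRowAt_eq (picture : List (List String)) (m : Nat) (hm : m < picture.length) :
    pvRowAt picture (m : Int) = picture[m] := by
  simp [pvRowAt, PySem.List.pyGetD_natCast, List.getD_eq_getElem?_getD, hm]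

theorem pvFoldB_succ (picture : List (List String)) (n : Int) (m : Nat) (hm : m < picture.length) :
    pvFoldB picture n (m + 1)
      = (pvBC n (pvRowAt picture (m : Int))).foldl
          (fun agg j => agg.insert j (pvUpd (pvJn (pvRowAt picture (m : Int)))
            ((pvBC n (pvRowAt picture (m : Int))).length : Int) (agg.get? j)))
          (pvFoldB picture n m) := by
  unfold pvFoldB
  rw [List.take_add_one, List.foldl_append]
  have : picture[m]? = some picture[m] := List.getElem?_eq_getElem hm
  rw [this]
  simp only [Option.toList_some, List.foldl_cons, List.foldl_nil]
  rw [pvB_body_eq]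
  rw [pvRowAt_eq picture m hm]
  rfl

theorem pvHd_append (l : List Int) (x : Int) (h : l ≠ []) : pvHd (l ++ [x]) = pvHd l := by
  cases l with
  | nil => exact absurd rfl h
  | cons a t => rfl

theorem pvAE_succ_skip (picture : List (List String)) (n : Int) (m : Nat) (j : Int)
    (hj : j ∉ pvBC n (pvRowAt picture (m : Int))) :
    pvAE picture n (m + 1) j = pvAE picture n m j := by
  unfold pvAE
  rw [pvCR_succ, if_neg hj, List.append_nil]

theorem pvCR_succ_skip (picture : List (List String)) (n : Int) (m : Nat) (j : Int)
    (hj : j ∉ pvBC n (pvRowAt picture (m : Int))) :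
    pvCR picture n (m + 1) j = pvCR picture n m j := by
  rw [pvCR_succ, if_neg hj, List.append_nil]

theorem pvCR_succ_mem (picture : List (List String)) (n : Int) (m : Nat) (j : Int)
    (hj : j ∈ pvBC n (pvRowAt picture (m : Int))) :
    pvCR picture n (m + 1) j = pvCR picture n m j ++ [(m : Int)] := by
  rw [pvCR_succ, if_pos hj]

theorem pvAE_succ_new (picture : List (List String)) (n : Int) (m : Nat) (j : Int)
    (hj : j ∈ pvBC n (pvRowAt picture (m : Int))) (hcr : pvCR picture n m j = []) :
    pvAE picture n (m + 1) j = true := by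
  unfold pvAE
  rw [pvCR_succ_mem _ _ _ _ hj, hcr, List.nil_append]
  simp [pvHd]

theorem pvAE_succ_mem (picture : List (List String)) (n : Int) (m : Nat) (j : Int)
    (hj : j ∈ pvBC n (pvRowAt picture (m : Int))) (hcr : pvCR picture n m j ≠ []) :
    pvAE picture n (m + 1) j
      = (pvAE picture n m j
         && (pvJn (pvRowAt picture (m : Int)) == pvJn (pvRowAt picture (pvHd (pvCR picture n m j))))) := by
  unfold pvAE
  rw [pvCR_succ_mem _ _ _ _ hj, pvHd_append _ _ hcr, List.all_append]
  simp

theorem pvB_inv (picture : List (List String)) (n : Int) (m : Nat) (hm : m ≤ picture.length) :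
    (∀ j : Int, (pvFoldB picture n m).get? j
        = if pvCR picture n m j = [] then none
          else some (((pvCR picture n m j).length : Int),
                     pvJn (pvRowAt picture (pvHd (pvCR picture n m j))),
                     ((pvBC n (pvRowAt picture (pvHd (pvCR picture n m j)))).length : Int),
                     pvAE picture n m j))
    ∧ (pvFoldB picture n m).keys.Nodup := by
  induction m with
  | zero =>
    constructor
    · intro j
      simp [pvFoldB, pvCR, PySem.List.pyRange_zero, PySem.Dict.get?_empty]
    · simp [pvFoldB, PySem.Dict.keys_empty]
  | succ m ih =>
    obtain ⟨hg, hn⟩ := ih (Nat.le_of_succ_le hm)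
    have hmlt : m < picture.length := hm
    rw [pvFoldB_succ picture n m hmlt]
    constructor
    · intro j
      by_cases hj : j ∈ pvBC n (pvRowAt picture (m : Int))
      · rw [pv_get?_inner _ _ _ (pvBC_nodup n _) j hj, hg j]
        by_cases hcr : pvCR picture n m j = []
        · rw [if_pos hcr, pvCR_succ_mem _ _ _ _ hj, hcr, List.nil_append]
          rw [if_neg (by simp), pvAE_succ_new _ _ _ _ hj hcr]
          simp [pvUpd, pvHd]
        · rw [if_neg hcr, pvCR_succ_mem _ _ _ _ hj]
          rw [if_neg (by simp), pvAE_succ_mem _ _ _ _ hj hcr, pvHd_append _ _ hcr]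
          simp only [pvUpd]
          refine congrArg some ?_
          refine Prod.ext ?_ (Prod.ext rfl (Prod.ext rfl ?_))
          · show ((pvCR picture n m j).length : Int) + 1 = ((pvCR picture n m j ++ [(m : Int)]).length : Int)
            simp
          · show (pvAE picture n m j && (pvJn (pvRowAt picture (m : Int)) == pvJn (pvRowAt picture (pvHd (pvCR picture n m j))))) = _
            rfl
      · rw [pv_get?_foldl_insert_of_not_mem _ _ _ hj, hg j,
            pvCR_succ_skip _ _ _ _ hj, pvAE_succ_skip _ _ _ _ hj]
    · rw [PySem.Dict.keys_foldl_insert]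
      exact PySem.Set.nodup_update _ _ hn

def pvQ (picture : List (List String)) (n N : Int) (j : Int) : Bool :=
  pvAE picture n picture.length j
    && (((pvCR picture n picture.length j).length : Int) == N)
    && (((pvBC n (pvRowAt picture (pvHd (pvCR picture n picture.length j)))).length : Int) == N)

theorem pv_all_congr {α : Type} (l : List α) (f g : α → Bool) (h : ∀ x ∈ l, f x = g x) :
    l.all f = l.all g := by
  induction l with
  | nil => rfl
  | cons x xs ih =>
    simp only [List.all_cons, h x List.mem_cons_self,
      ih (fun y hy => h y (List.mem_cons_of_mem _ hy))]

theorem pv_foldl_addN (q : Int → Bool) (N : Int) (l : List Int) (a : Int) :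
    l.foldl (fun c x => if q x then c + N else c) a = a + N * (l.countP q : Int) := by
  induction l generalizing a with
  | nil => simp
  | cons x xs ih =>
    by_cases h : q x
    · simp only [List.foldl_cons, h, if_true, ih, List.countP_cons]
      push_cast
      ring
    · simp only [List.foldl_cons, h, ih, List.countP_cons]
      simp

theorem pv_memCR_bounds (picture : List (List String)) (n : Int) (m : Nat) (j v : Int)
    (hv : v ∈ pvCR picture n m j) : 0 ≤ v ∧ v < (m : Int) := by
  have := (List.mem_filter.mp hv).1
  exact (PySem.List.mem_pyRange_one).mp this

theorem pv_if_shape (a b : Bool) (c N : Int) :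
    (if !a then c else if !b then c else c + N) = (if a && b then c + N else c) := by
  cases a <;> cases b <;> simp

theorem pv_cond_eq (a : Bool) (x y N : Int) :
    (a && ((x == y) && (y == N))) = ((a && (x == N)) && (y == N)) := by
  have e : ∀ u v : Int, (u == v) = decide (u = v) := fun u v => by
    by_cases h : u = v <;> simp [h]
  simp only [e]
  cases a
  · simp
  · simp only [Bool.true_and]
    by_cases h1 : x = y <;> by_cases h2 : y = N <;> by_cases h3 : x = N <;>
      simp [h1, h2, h3]


-- A's result counts qualifying columns over crb's keys
theorem pvA_final (picture : List (List String)) (N : Int) :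
    sum_black_pixels_in_columns_where_all_black_pixels_in_the_column_are_in_lines_that_are_equal picture N
      = 0 + N * (((pvFoldA picture (PySem.List.len (PySem.List.pyGetD picture 0 [])) picture.length).1.keys.countP
          (pvQ picture (PySem.List.len (PySem.List.pyGetD picture 0 [])) N)) : Int) := by
  have hA := pvA_inv picture (PySem.List.len (PySem.List.pyGetD picture 0 [])) picture.length
  obtain ⟨ha, hb, hc, hd, he, hf⟩ := hA
  have h0 : sum_black_pixels_in_columns_where_all_black_pixels_in_the_column_are_in_lines_that_are_equal picture N
      = (pvFoldA picture (PySem.List.len (PySem.List.pyGetD picture 0 [])) picture.length).1.keys.foldl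
          (fun count col =>
            let st := pvFoldA picture (PySem.List.len (PySem.List.pyGetD picture 0 [])) picture.length
            let rows := st.1.getD col []
            if !(rows.all (fun row => st.2.1.getD row "" == st.2.1.getD (PySem.List.pyGetD rows 0 0) "")) then count
            else if !((st.2.2.1.getD col 0 == st.2.2.2.getD (PySem.List.pyGetD rows 0 0) 0) &&
                      (st.2.2.2.getD (PySem.List.pyGetD rows 0 0) 0 == N)) then count
            else count + N) 0 := rfl
  rw [h0]
  rw [PySem.List.foldl_congr_mem _ _
        (fun count col => if pvQ picture (PySem.List.len (PySem.List.pyGetD picture 0 [])) N col then count + N else count) 0 ?_]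
  · exact pv_foldl_addN _ N _ 0
  · intro acc col hcol
    simp only []
    have hne := (he col).mp hcol
    obtain ⟨x, t, hxt⟩ := List.exists_cons_of_ne_nil hne
    have hxmem : x ∈ pvCR picture (PySem.List.len (PySem.List.pyGetD picture 0 [])) picture.length col := by
      rw [hxt]; exact List.mem_cons_self
    have hxb := pv_memCR_bounds _ _ _ _ _ hxmem
    rw [hd col, hxt, PySem.List.pyGetD_zero_cons]
    have hall : ((x :: t).all (fun row =>
          (pvFoldA picture (PySem.List.len (PySem.List.pyGetD picture 0 [])) picture.length).2.1.getD row "" ==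
          (pvFoldA picture (PySem.List.len (PySem.List.pyGetD picture 0 [])) picture.length).2.1.getD x ""))
        = pvAE picture (PySem.List.len (PySem.List.pyGetD picture 0 [])) picture.length col := by
      unfold pvAE
      rw [hxt]
      refine pv_all_congr _ _ _ ?_
      intro row hrow
      have hrb := pv_memCR_bounds picture (PySem.List.len (PySem.List.pyGetD picture 0 [])) picture.length col row (hxt ▸ hrow)
      rw [ha row, ha x, if_pos hrb, if_pos hxb]
      show _ = (pvJn (pvRowAt picture row) == pvJn (pvRowAt picture (pvHd (x :: t))))
      rfl
    rw [hall, hc col, hb x, if_pos hxb, hxt]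
    rw [pv_if_shape, pv_cond_eq]
    unfold pvQ
    rw [hxt]
    rfl

-- B's result counts the same qualifying columns over agg's keys
theorem pvB_final (picture : List (List String)) (N : Int) :
    sum_black_pixels_in_columns_where_all_black_pixels_in_the_column_are_in_lines_that_are_equal_alt picture N
      = 0 + N * (((pvFoldB picture (PySem.List.len (PySem.List.pyGetD picture 0 [])) picture.length).keys.countP
          (pvQ picture (PySem.List.len (PySem.List.pyGetD picture 0 [])) N)) : Int) := by
  obtain ⟨hg, hnd⟩ := pvB_inv picture (PySem.List.len (PySem.List.pyGetD picture 0 [])) picture.length le_rfl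
  have hfb : pvFoldB picture (PySem.List.len (PySem.List.pyGetD picture 0 [])) picture.length
      = picture.foldl
          (fun agg row =>
            let s := PySem.Str.join "" row
            let bcols := (PySem.List.pyRange 0 (PySem.List.len (PySem.List.pyGetD picture 0 [])) 1).filter
              (fun j => PySem.List.pyGetD row j "" == "B")
            let b : Int := PySem.List.len bcols
            bcols.foldl
              (fun agg j =>
                match agg.get? j with
                | some v => agg.insert j (v.1 + 1, v.2.1, v.2.2.1, v.2.2.2 && (s == v.2.1))
                | none => agg.insert j ((1 : Int), s, b, true))
              agg)
          PySem.Dict.empty := by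
    unfold pvFoldB
    rw [List.take_length]
  have h0 : sum_black_pixels_in_columns_where_all_black_pixels_in_the_column_are_in_lines_that_are_equal_alt picture N
      = (pvFoldB picture (PySem.List.len (PySem.List.pyGetD picture 0 [])) picture.length).values.foldl
          (fun total v => if v.2.2.2 && (v.1 == N) && (v.2.2.1 == N) then total + N else total) 0 := by
    rw [hfb]
    rfl
  rw [h0, PySem.Dict.values_eq_map_keys _ hnd ((0 : Int), "", (0 : Int), false), List.foldl_map]
  rw [PySem.List.foldl_congr_mem _ _
        (fun total k => if pvQ picture (PySem.List.len (PySem.List.pyGetD picture 0 [])) N k then total + N else total) 0 ?_]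
  · exact pv_foldl_addN _ N _ 0
  · intro acc k hk
    have hne : pvCR picture (PySem.List.len (PySem.List.pyGetD picture 0 [])) picture.length k ≠ [] := by
      intro hcr
      have hnone : (pvFoldB picture (PySem.List.len (PySem.List.pyGetD picture 0 [])) picture.length).get? k = none := by
        rw [hg k, if_pos hcr]
      exact (PySem.Dict.get?_eq_none_iff_not_mem_keys _ _).mp hnone hk
    have hsome := hg k
    rw [if_neg hne] at hsome
    rw [PySem.Dict.getD_eq_get?_getD, hsome]
    rfl

theorem pv_main (picture : List (List String)) (N : Int) :
    sum_black_pixels_in_columns_where_all_black_pixels_in_the_column_are_in_lines_that_are_equal picture N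
      = sum_black_pixels_in_columns_where_all_black_pixels_in_the_column_are_in_lines_that_are_equal_alt picture N := by
  rw [pvA_final, pvB_final]
  have hA := pvA_inv picture (PySem.List.len (PySem.List.pyGetD picture 0 [])) picture.length
  have hB := pvB_inv picture (PySem.List.len (PySem.List.pyGetD picture 0 [])) picture.length le_rfl
  congr 2
  refine congrArg _ (List.Perm.countP_eq _ ?_)
  refine (List.perm_ext_iff_of_nodup hA.2.2.2.2.2 hB.2).mpr ?_
  intro j
  rw [hA.2.2.2.2.1 j]
  have hBj := hB.1 j
  constructor
  · intro hcr
    by_contra hnk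
    rw [← PySem.Dict.get?_eq_none_iff_not_mem_keys, hBj, if_neg hcr] at hnk
    exact Option.some_ne_none _ hnk
  · intro hk hcr
    have hnone : (pvFoldB picture (PySem.List.len (PySem.List.pyGetD picture 0 [])) picture.length).get? j = none := by
      rw [hBj, if_pos hcr]
    exact (PySem.Dict.get?_eq_none_iff_not_mem_keys _ _).mp hnone hk

-- ===== VERDICT (by name: the statement is the Claim_ definition above) =====
theorem sum_black_pixels_in_columns_where_all_black_pixels_in_the_column_are_in_lines_that_are_equal_spec : Claim_equal_sum_black_pixels_in_columns_where_all_black_pixels_in_the_column_are_in_lines_that_are_equal := by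
  intro picture N _ _
  exact pv_main picture N
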